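-- pv_equiv track=rewrite | github.com/KAKAcrab/CTDGs_in_green_plants | custom_script/validate_merge_result.py | find_overlaps
-- ===== SOURCE A (Python) =====
-- def find_overlaps(clusters):
--     overlaps = []
--     cluster_list = list(clusters.items())
--     for i in range(len(cluster_list)):
--         for j in range(i+1, len(cluster_list)):
--             cluster1, genes1 = cluster_list[i]
--             cluster2, genes2 = cluster_list[j]
--             overlap = genes1 & genes2
--             if overlap and not genes1.issubset(genes2) and not genes2.issubset(genes1):
--                 overlaps.append((cluster1, cluster2, len(overlap)))
--     return overlaps
-- ===== SOURCE B (Python) =====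
-- def find_overlaps(clusters):
--     items = list(clusters.items())
--     n = len(items)
--     # one (gene, cluster-index) record per incidence
--     incidences = [(g, idx) for idx, (_, genes) in enumerate(items) for g in genes]
--     # inverted index: gene -> ascending list of cluster indices containing it
--     index = {}
--     for g, idx in incidences:
--         index.setdefault(g, []).append(idx)
--     # one key per (gene, cluster pair) co-occurrence
--     pair_keys = [(occ[a], occ[b])
--                  for occ in index.values()
--                  for a in range(len(occ))
--                  for b in range(a + 1, len(occ))]
--     # counts[(i, j)] = |genes_i & genes_j| for i < j
--     counts = {}
--     for k in pair_keys:
--         counts[k] = counts.get(k, 0) + 1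
--     out = []
--     for i in range(n):
--         name1, genes1 = items[i]
--         for j in range(i + 1, n):
--             c = counts.get((i, j), 0)
--             # partial overlap: non-empty and a proper subset of neither side
--             if 0 < c < len(genes1) and c < len(items[j][1]):
--                 out.append((name1, items[j][0], c))
--     return out
-- ===== Notes on version B (the rewrite author's own statement) =====
-- stated objective: alternative
-- what changed: B replaces A's per-pair set intersection and two subset tests by a gene->cluster inverted index whose co-occurrence pair counter gives each pair's overlap size, so 'partial overlap' is decided by comparing that count with the two set sizes.
import Mathlib
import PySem

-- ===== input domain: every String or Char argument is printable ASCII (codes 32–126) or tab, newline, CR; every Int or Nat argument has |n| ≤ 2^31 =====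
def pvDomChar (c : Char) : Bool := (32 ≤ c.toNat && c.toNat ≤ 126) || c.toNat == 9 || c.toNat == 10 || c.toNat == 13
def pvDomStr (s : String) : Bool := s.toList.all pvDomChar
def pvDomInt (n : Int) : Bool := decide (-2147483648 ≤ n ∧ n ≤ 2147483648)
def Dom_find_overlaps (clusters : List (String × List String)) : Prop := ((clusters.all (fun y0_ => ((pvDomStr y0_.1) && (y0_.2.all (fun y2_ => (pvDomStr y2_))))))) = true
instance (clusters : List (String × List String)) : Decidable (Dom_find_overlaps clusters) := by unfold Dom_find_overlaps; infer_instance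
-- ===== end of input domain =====

-- B replaces the per-pair set intersection/subset work by a gene->cluster inverted index and a
-- co-occurrence counter, deciding "partial overlap" from the shared-gene count alone (alternative algorithm).

-- ===== PORT A =====
def find_overlaps (clusters : List (String × List String)) : List (String × String × Int) :=
  (PySem.List.pyRange 0 (clusters.length : Int)).foldl (fun overlaps i =>
    (PySem.List.pyRange (i + 1) (clusters.length : Int)).foldl (fun overlaps j =>
      let c1 := PySem.List.pyGetD clusters i ("", [])
      let c2 := PySem.List.pyGetD clusters j ("", [])
      let overlap := PySem.Set.inter c1.2 c2.2
      if !overlap.isEmpty && !PySem.Set.issubset c1.2 c2.2 && !PySem.Set.issubset c2.2 c1.2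
      then overlaps ++ [(c1.1, c2.1, (overlap.length : Int))]
      else overlaps) overlaps) []

-- ===== PORT B =====
def find_overlaps_alt (clusters : List (String × List String)) : List (String × String × Int) :=
  let items := clusters
  let n : Int := (items.length : Int)
  let incidences := (PySem.List.enumerate items).flatMap (fun p => p.2.2.map (fun g => (g, p.1)))
  let index := incidences.foldl (fun d q => d.modify q.1 [] (fun occ => occ ++ [q.2])) PySem.Dict.empty
  let pair_keys := index.values.flatMap (fun occ =>
    (PySem.List.pyRange 0 (occ.length : Int)).flatMap (fun a =>
      (PySem.List.pyRange (a + 1) (occ.length : Int)).map (fun b =>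
        (PySem.List.pyGetD occ a 0, PySem.List.pyGetD occ b 0))))
  let counts := pair_keys.foldl (fun d k => d.insert k (d.getD k 0 + 1)) PySem.Dict.empty
  (PySem.List.pyRange 0 n).foldl (fun out i =>
    let it1 := PySem.List.pyGetD items i ("", [])
    (PySem.List.pyRange (i + 1) n).foldl (fun out j =>
      let c := counts.getD (i, j) 0
      if 0 < c && c < (it1.2.length : Int) && c < ((PySem.List.pyGetD items j ("", [])).2.length : Int)
      then out ++ [(it1.1, (PySem.List.pyGetD items j ("", [])).1, c)]
      else out) out) []

-- ===== PRECONDITION & SPEC =====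
-- The gene lists stand for Python sets (dict[str, set[str]]); Pre_ requires each of them to be
-- duplicate-free, since a list with duplicates represents no Python input of A at all.
def Pre_find_overlaps (clusters : List (String × List String)) : Prop :=
  ∀ p ∈ clusters, p.2.Nodup
instance (clusters : List (String × List String)) : Decidable (Pre_find_overlaps clusters) := by
  unfold Pre_find_overlaps; infer_instance

def pvWitness_find_overlaps : (List (String × List String)) :=
  [("c1", ["a", "b"]), ("c2", ["b", "c"]), ("c3", ["b"])]

def Spec_find_overlaps (clusters : List (String × List String)) (out : List (String × String × Int)) : Prop := out = find_overlaps_alt clusters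
instance (clusters : List (String × List String)) (out : List (String × String × Int)) : Decidable (Spec_find_overlaps clusters out) := by unfold Spec_find_overlaps; infer_instance

-- ===== CLAIM (what is proved, stated in full; the proofs are below) =====
def Claim_equal_find_overlaps : Prop := ∀ (clusters : List (String × List String)), Dom_find_overlaps clusters → Pre_find_overlaps clusters → Spec_find_overlaps clusters (find_overlaps clusters)

-- ===== LEMMAS AND PROOFS =====

-- the gene set of cluster number i (empty past the end)
def pvGenes (cs : List (String × List String)) (i : Nat) : List String :=
  (cs.getD i ("", [])).2

-- B's incidence list: one (gene, cluster index) pair per gene occurrence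
def pvIncid (cs : List (String × List String)) : List (String × Int) :=
  (PySem.List.enumerate cs).flatMap (fun p => p.2.2.map (fun g => (g, p.1)))

-- B's inverted index, pair-key list and counter, named for the proofs
def pvIndex (cs : List (String × List String)) : PySem.Dict String (List Int) :=
  (pvIncid cs).foldl (fun d q => d.modify q.1 [] (fun occ => occ ++ [q.2])) PySem.Dict.empty

def pvPairKeys (cs : List (String × List String)) : List (Int × Int) :=
  (pvIndex cs).values.flatMap (fun occ =>
    (PySem.List.pyRange 0 (occ.length : Int)).flatMap (fun a =>
      (PySem.List.pyRange (a + 1) (occ.length : Int)).map (fun b =>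
        (PySem.List.pyGetD occ a 0, PySem.List.pyGetD occ b 0))))

def pvCounts (cs : List (String × List String)) : PySem.Dict (Int × Int) Int :=
  (pvPairKeys cs).foldl (fun d k => d.insert k (d.getD k 0 + 1)) PySem.Dict.empty

-- the ascending list of (indices of) clusters containing gene g
def pvOcc (cs : List (String × List String)) (g : String) : List Int :=
  ((List.range cs.length).filter (fun i => (pvGenes cs i).contains g)).map (fun i : Nat => (i : Int))

-- all ordered index pairs (earlier element, later element) of a list
def pvPairsOf : List Int → List (Int × Int)
  | [] => []
  | x :: xs => xs.map (fun y => (x, y)) ++ pvPairsOf xs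

lemma pv_alt_eq (cs : List (String × List String)) :
    find_overlaps_alt cs =
      (PySem.List.pyRange 0 (cs.length : Int)).foldl (fun out i =>
        let it1 := PySem.List.pyGetD cs i ("", [])
        (PySem.List.pyRange (i + 1) (cs.length : Int)).foldl (fun out j =>
          let c := (pvCounts cs).getD (i, j) 0
          if 0 < c && c < (it1.2.length : Int) && c < ((PySem.List.pyGetD cs j ("", [])).2.length : Int)
          then out ++ [(it1.1, (PySem.List.pyGetD cs j ("", [])).1, c)]
          else out) out) [] := rfl

lemma pv_flatMap_congr {α β : Type} {l : List α} {f g : α → List β}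
    (h : ∀ a ∈ l, f a = g a) : l.flatMap f = l.flatMap g := by
  induction l with
  | nil => rfl
  | cons a t ih =>
    simp only [List.flatMap_cons, h a (List.mem_cons_self),
      ih (fun x hx => h x (List.mem_cons_of_mem a hx))]

-- filtering a duplicate-free list for one element
lemma pv_filter_nodup {l : List String} (h : l.Nodup) (g : String) :
    l.filter (fun x => x == g) = if g ∈ l then [g] else [] := by
  induction l with
  | nil => simp
  | cons a t ih =>
    simp only [List.nodup_cons] at h
    rcases h with ⟨ha, ht⟩
    by_cases hag : a = g
    · subst hag
      have h0 : List.filter (fun x => x == a) t = [] := by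
        simp [List.filter_eq_nil_iff]
        intro x hx hxa; exact ha (hxa ▸ hx)
      simp [h0]
    · simp [hag, ih ht]
      by_cases hg : g ∈ t <;> simp [hg, Ne.symm hag]

-- the occurrence list of gene g as read off the incidence list
lemma pv_enum_occ (cs : List (String × List String)) (hnd : ∀ p ∈ cs, p.2.Nodup)
    (g : String) (s : Int) :
    (((PySem.List.enumerate cs s).flatMap (fun p => p.2.2.map (fun g' => (g', p.1)))).filter
        (fun q => q.1 == g)).map (fun q => q.2)
      = ((List.range cs.length).filter (fun i => (cs.getD i ("", [])).2.contains g)).map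
          (fun i : Nat => s + (i : Int)) := by
  induction cs generalizing s with
  | nil => simp [PySem.List.enumerate]
  | cons c t ih =>
    have hc : c.2.Nodup := hnd c (List.mem_cons_self)
    have ht : ∀ p ∈ t, p.2.Nodup := fun p hp => hnd p (List.mem_cons_of_mem c hp)
    rw [show PySem.List.enumerate (c :: t) s = (s, c) :: PySem.List.enumerate t (s + 1) from by
      simp [PySem.List.enumerate]]
    rw [List.flatMap_cons, List.filter_append, List.map_append, ih ht (s + 1)]
    rw [List.length_cons, List.range_succ_eq_map, List.filter_cons]
    have hhead : ((c.2.map (fun g' => (g', s))).filter (fun q => q.1 == g)).map (fun q => q.2)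
        = if g ∈ c.2 then [s] else [] := by
      rw [List.filter_map, List.map_map]
      have : (fun q : String × Int => q.1 == g) ∘ (fun g' => (g', s)) = (fun x => x == g) := rfl
      rw [this, pv_filter_nodup hc g]
      by_cases hg : g ∈ c.2 <;> simp [hg]
    rw [hhead]
    have hsucc : ((fun i => ((c :: t).getD i ("", [])).2.contains g) ∘ Nat.succ)
        = (fun i => (t.getD i ("", [])).2.contains g) := by
      funext i; simp
    have htail : List.map (fun i : Nat => s + (i : Int))
          (List.map Nat.succ (List.filter ((fun i => ((c :: t).getD i ("", [])).2.contains g) ∘ Nat.succ) (List.range t.length)))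
        = List.map (fun i : Nat => s + 1 + (i : Int))
            (List.filter (fun i => (t.getD i ("", [])).2.contains g) (List.range t.length)) := by
      rw [hsucc, List.map_map]
      apply List.map_congr_left
      intro i _
      simp
      ring
    by_cases hg : g ∈ c.2
    · rw [if_pos hg, if_pos (by simpa using hg)]
      rw [List.map_cons, List.filter_map, htail]
      simp
    · rw [if_neg hg, if_neg (by simpa using hg)]
      rw [List.filter_map, htail]
      simp

lemma pv_index_getD (cs : List (String × List String)) (hnd : ∀ p ∈ cs, p.2.Nodup)
    (g : String) : (pvIndex cs).getD g [] = pvOcc cs g := by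
  rw [pvIndex, PySem.Dict.getD_foldl_modify_append]
  have h := pv_enum_occ cs hnd g 0
  rw [pvIncid, pvOcc]
  simp only [PySem.Dict.getD_empty, List.nil_append]
  rw [h]
  apply List.map_congr_left
  intro i _
  simp

lemma pv_index_keys (cs : List (String × List String)) :
    (pvIndex cs).keys = PySem.Set.ofList ((pvIncid cs).map (fun q => q.1)) := by
  rw [pvIndex]
  rw [PySem.Dict.keys_foldl_modify_key (pvIncid cs) (fun q => q.1) [] (fun _ q => (fun occ => occ ++ [q.2]))]
  simp [PySem.Set.update, PySem.Set.ofList_eq_foldl]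

lemma pv_index_keys_nodup (cs : List (String × List String)) :
    (pvIndex cs).keys.Nodup := by
  rw [pv_index_keys]
  exact PySem.Set.nodup_ofList _

lemma pv_index_values (cs : List (String × List String)) (hnd : ∀ p ∈ cs, p.2.Nodup) :
    (pvIndex cs).values
      = (PySem.Set.ofList ((pvIncid cs).map (fun q => q.1))).map (pvOcc cs) := by
  rw [PySem.Dict.values_eq_map_keys _ (pv_index_keys_nodup cs) [], pv_index_keys]
  apply List.map_congr_left
  intro g _
  exact pv_index_getD cs hnd g

-- a gene of an in-range cluster occurs in the incidence list
lemma pv_mem_incid (cs : List (String × List String)) (hnd : ∀ p ∈ cs, p.2.Nodup)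
    {g : String} {i : Nat} (hi : i < cs.length) (hg : g ∈ pvGenes cs i) :
    g ∈ (pvIncid cs).map (fun q => q.1) := by
  have h := pv_enum_occ cs hnd g 0
  have hmem : (0 + (i : Int)) ∈ ((List.range cs.length).filter
      (fun i => (cs.getD i ("", [])).2.contains g)).map (fun i : Nat => 0 + (i : Int)) := by
    apply List.mem_map_of_mem
    rw [List.mem_filter]
    exact ⟨List.mem_range.mpr hi, by simpa [pvGenes] using hg⟩
  rw [← h] at hmem
  obtain ⟨q, hq, _⟩ := List.mem_map.mp hmem
  rw [List.mem_filter] at hq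
  exact List.mem_map.mpr ⟨q, hq.1, by simpa using hq.2⟩

lemma pv_map_range_getD {α : Type} (xs : List α) (d : α) :
    (List.range xs.length).map (fun k => xs.getD k d) = xs := by
  apply List.ext_getElem
  · simp
  · intro i h1 h2
    simp [List.getD_eq_getElem?_getD, List.getElem?_eq_getElem h2]

lemma pv_pyRange_succ (k len : Nat) :
    PySem.List.pyRange ((k : Int) + 1) (len : Int)
      = (List.range (len - (k + 1))).map (fun m => ((k + 1 + m : Nat) : Int)) := by
  rw [PySem.List.pyRange_of_pos _ _ (by norm_num : (0:Int) < 1)]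
  by_cases h : (k : Int) + 1 < len
  · have : ((len : Int) - (↑k + 1) + 1 - 1) / 1 = ((len - (k+1) : Nat) : Int) := by
      omega
    rw [if_pos h, this]
    simp only [Int.toNat_natCast]
    apply List.map_congr_left
    intro m _; push_cast; ring
  · rw [if_neg h]
    have : len - (k + 1) = 0 := by omega
    simp [this]

lemma pv_P_eq_nat (occ : List Int) :
    (PySem.List.pyRange 0 (occ.length : Int)).flatMap (fun a =>
        (PySem.List.pyRange (a + 1) (occ.length : Int)).map (fun b =>
          (PySem.List.pyGetD occ a 0, PySem.List.pyGetD occ b 0)))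
      = (List.range occ.length).flatMap (fun k =>
          (List.range (occ.length - (k + 1))).map (fun m =>
            (occ.getD k 0, occ.getD (k + 1 + m) 0))) := by
  rw [PySem.List.pyRange_zero_natCast, List.flatMap_map]
  apply pv_flatMap_congr
  intro k hk
  rw [pv_pyRange_succ, List.map_map]
  apply List.map_congr_left
  intro m _
  simp [PySem.List.pyGetD_natCast, List.getD]
  rw [show ((k:Int) + 1 + (m:Int)) = ((k + 1 + m : Nat) : Int) from by push_cast; ring]
  rw [PySem.List.pyGetD_natCast]
  simp [List.getD_eq_getElem?_getD]

-- the double index loop over a list produces exactly its ordered pairs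
lemma pv_P_eq_pairsOf (occ : List Int) :
    (PySem.List.pyRange 0 (occ.length : Int)).flatMap (fun a =>
        (PySem.List.pyRange (a + 1) (occ.length : Int)).map (fun b =>
          (PySem.List.pyGetD occ a 0, PySem.List.pyGetD occ b 0)))
      = pvPairsOf occ := by
  rw [pv_P_eq_nat]
  induction occ with
  | nil => simp [pvPairsOf]
  | cons x xs ih =>
    rw [List.length_cons, List.range_succ_eq_map, List.flatMap_cons, List.flatMap_map, pvPairsOf]
    congr 1
    · simp only [Nat.add_sub_cancel, List.getD_cons_zero]
      have hstep : ∀ m : Nat, (x :: xs).getD (0 + 1 + m) 0 = xs.getD m 0 := by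
        intro m; simp [Nat.add_comm]
      calc (List.range xs.length).map (fun m => (x, (x :: xs).getD (0 + 1 + m) 0))
          = (List.range xs.length).map (fun m => (x, xs.getD m 0)) := by
            apply List.map_congr_left; intro m _; rw [hstep]
        _ = xs.map (fun y => (x, y)) := by
            conv_rhs => rw [← pv_map_range_getD xs 0]
            rw [List.map_map]
            simp [Function.comp_def]
    · rw [← ih]
      apply pv_flatMap_congr
      intro k _
      have h1 : xs.length + 1 - (k + 1 + 1) = xs.length - (k + 1) := by omega
      rw [h1]
      apply List.map_congr_left
      intro m _
      have e2 : Nat.succ k + 1 + m = (k + 1 + m) + 1 := by omega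
      simp only [e2, List.getD_cons_succ, Nat.succ_eq_add_one]

lemma pv_count_map_pair (xs : List Int) (x a b : Int) :
    (xs.map (fun y => (x, y))).count (a, b) = if x = a then xs.count b else 0 := by
  by_cases hxa : x = a
  · subst hxa
    simp only [if_true]
    exact List.count_map_of_injective _ _ (fun u v huv => by simpa using huv) _
  · simp only [hxa, if_false]
    rw [List.count_eq_zero]
    intro hmem
    obtain ⟨y, _, heq⟩ := List.mem_map.mp hmem
    exact hxa (congrArg Prod.fst heq)

lemma pv_count_nodup (xs : List Int) (j : Int) (h : xs.Nodup) :
    xs.count j = if j ∈ xs then 1 else 0 := by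
  by_cases hj : j ∈ xs
  · simp only [hj, if_true]
    exact le_antisymm (List.nodup_iff_count_le_one.mp h j) (List.count_pos_iff.mpr hj)
  · simp [List.count_eq_zero.mpr hj, hj]

-- counting one pair among the ordered pairs of a strictly increasing list
lemma pv_count_pairsOf {occ : List Int} (hso : occ.Pairwise (· < ·)) {i j : Int} (hij : i < j) :
    (pvPairsOf occ).count (i, j) = if i ∈ occ ∧ j ∈ occ then 1 else 0 := by
  induction occ with
  | nil => simp [pvPairsOf]
  | cons x xs ih =>
    simp only [List.pairwise_cons] at hso
    rcases hso with ⟨hx, hxs⟩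
    have hnd : xs.Nodup := hxs.imp (fun h => ne_of_lt h)
    rw [pvPairsOf, List.count_append, pv_count_map_pair, ih hxs]
    by_cases hxi : x = i
    · subst hxi
      have hinx : x ∉ xs := fun hmem => lt_irrefl x (hx x hmem)
      have hjx : j ≠ x := fun heq => absurd (heq ▸ hij) (lt_irrefl x)
      rw [pv_count_nodup xs j hnd]
      simp [hinx, hjx]
    · by_cases hi : i ∈ xs
      · have hxj : j ≠ x := fun heq => by
          have := hx i hi
          omega
        simp [hxi, hi, hxj, Ne.symm hxi]
      · simp [hxi, hi, Ne.symm hxi]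

lemma pv_occ_sorted (cs : List (String × List String)) (g : String) :
    (pvOcc cs g).Pairwise (· < ·) := by
  rw [pvOcc, List.pairwise_map]
  apply List.Pairwise.filter
  have := List.pairwise_lt_range (n := cs.length)
  exact this.imp (fun h => by exact_mod_cast h)

lemma pv_mem_occ (cs : List (String × List String)) (g : String) (i : Nat) :
    ((i : Int) ∈ pvOcc cs g) ↔ (i < cs.length ∧ g ∈ pvGenes cs i) := by
  rw [pvOcc]
  simp only [List.mem_map, List.mem_filter, List.mem_range]
  constructor
  · rintro ⟨i', ⟨hlt, hcont⟩, heq⟩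
    have : i' = i := by exact_mod_cast heq
    subst this
    exact ⟨hlt, by simpa using hcont⟩
  · rintro ⟨hlt, hmem⟩
    exact ⟨i, ⟨hlt, by simpa using hmem⟩, rfl⟩

lemma pv_sum_ite_countP {α : Type} (l : List α) (p : α → Prop) [DecidablePred p] :
    (l.map (fun a => if p a then 1 else 0)).sum = l.countP (fun a => decide (p a)) := by
  induction l with
  | nil => simp
  | cons a t ih =>
    simp only [List.map_cons, List.sum_cons, List.countP_cons, ih]
    by_cases hp : p a <;> simp [hp, Nat.add_comm]

lemma pv_genes_nodup (cs : List (String × List String)) (hnd : ∀ p ∈ cs, p.2.Nodup)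
    {i : Nat} (hi : i < cs.length) : (pvGenes cs i).Nodup := by
  have : cs.getD i ("", []) ∈ cs := by
    rw [List.getD_eq_getElem?_getD, List.getElem?_eq_getElem hi]
    exact List.getElem_mem hi
  exact hnd _ this

-- the heart of the equivalence: the pair counter holds the intersection sizes
lemma pv_pairkeys_count (cs : List (String × List String)) (hnd : ∀ p ∈ cs, p.2.Nodup)
    {i j : Nat} (hij : i < j) (hj : j < cs.length) :
    (pvPairKeys cs).count ((i : Int), (j : Int))
      = ((pvGenes cs i).filter (fun g => (pvGenes cs j).contains g)).length := by
  have hi : i < cs.length := lt_trans hij hj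
  rw [pvPairKeys, pv_index_values cs hnd, List.flatMap_map, List.count_flatMap]
  have hper : ∀ g ∈ PySem.Set.ofList ((pvIncid cs).map (fun q => q.1)),
      (List.count ((i:Int), (j:Int)) ∘ fun a =>
        (PySem.List.pyRange 0 ((pvOcc cs a).length : Int)).flatMap (fun a1 =>
          (PySem.List.pyRange (a1 + 1) ((pvOcc cs a).length : Int)).map (fun b =>
            (PySem.List.pyGetD (pvOcc cs a) a1 0, PySem.List.pyGetD (pvOcc cs a) b 0)))) g
      = if g ∈ pvGenes cs i ∧ g ∈ pvGenes cs j then 1 else 0 := by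
    intro g _
    simp only [Function.comp_apply, pv_P_eq_pairsOf]
    rw [pv_count_pairsOf (pv_occ_sorted cs g) (by exact_mod_cast hij)]
    by_cases h1 : g ∈ pvGenes cs i <;> by_cases h2 : g ∈ pvGenes cs j <;>
      simp [pv_mem_occ, h1, h2, hi, hj]
  rw [List.map_congr_left hper]
  rw [pv_sum_ite_countP _ (fun g => g ∈ pvGenes cs i ∧ g ∈ pvGenes cs j)]
  rw [List.countP_eq_length_filter]
  apply List.Perm.length_eq
  apply (List.perm_ext_iff_of_nodup ((PySem.Set.nodup_ofList _).filter _)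
    ((pv_genes_nodup cs hnd hi).filter _)).mpr
  intro x
  simp only [List.mem_filter, PySem.Set.mem_ofList, decide_eq_true_eq, List.contains_iff_mem]
  constructor
  · rintro ⟨_, h1, h2⟩; exact ⟨h1, by simpa using h2⟩
  · rintro ⟨h1, h2⟩
    exact ⟨pv_mem_incid cs hnd hi h1, h1, by simpa using h2⟩

lemma pv_counts_getD (cs : List (String × List String)) (hnd : ∀ p ∈ cs, p.2.Nodup)
    {i j : Nat} (hij : i < j) (hj : j < cs.length) :
    (pvCounts cs).getD ((i : Int), (j : Int)) 0
      = (((pvGenes cs i).filter (fun g => (pvGenes cs j).contains g)).length : Int) := by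
  rw [pvCounts, PySem.Dict.foldl_insert_getD_add_one_eq_counter, PySem.Dict.getD_counter]
  exact_mod_cast pv_pairkeys_count cs hnd hij hj

-- the two intersection counts are symmetric (duplicate-free lists)
lemma pv_inter_comm {l m : List String} (hl : l.Nodup) (hm : m.Nodup) :
    (l.filter (fun g => m.contains g)).length = (m.filter (fun g => l.contains g)).length := by
  apply List.Perm.length_eq
  apply (List.perm_ext_iff_of_nodup (hl.filter _) (hm.filter _)).mpr
  intro x
  simp only [List.mem_filter, List.contains_iff_mem]
  constructor <;> (rintro ⟨h1, h2⟩; exact ⟨by simpa using h2, by simpa using h1⟩)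

-- a subset test is an intersection-size test
lemma pv_subset_iff_len (l m : List String) :
    PySem.Set.issubset l m = true ↔ (l.filter (fun g => m.contains g)).length = l.length := by
  rw [PySem.Set.issubset]
  rw [List.length_filter_eq_length_iff]
  simp [PySem.Set.contains]

theorem pv_main (cs : List (String × List String)) (hnd : ∀ p ∈ cs, p.2.Nodup) :
    find_overlaps cs =
      (PySem.List.pyRange 0 (cs.length : Int)).foldl (fun out i =>
        let it1 := PySem.List.pyGetD cs i ("", [])
        (PySem.List.pyRange (i + 1) (cs.length : Int)).foldl (fun out j =>
          let c := (pvCounts cs).getD (i, j) 0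
          if 0 < c && c < (it1.2.length : Int) && c < ((PySem.List.pyGetD cs j ("", [])).2.length : Int)
          then out ++ [(it1.1, (PySem.List.pyGetD cs j ("", [])).1, c)]
          else out) out) [] := by
  rw [find_overlaps]
  apply PySem.List.foldl_congr_mem
  intro acc i hi
  beta_reduce
  apply PySem.List.foldl_congr_mem
  intro acc' j hj
  rw [PySem.List.mem_pyRange_one] at hi hj
  lift i to ℕ using hi.1 with i'
  lift j to ℕ using (by omega : (0:Int) ≤ j) with j'
  have hij : i' < j' := by exact_mod_cast (by omega : (i' : Int) < j')
  have hjn : j' < cs.length := by exact_mod_cast hj.2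
  have hin : i' < cs.length := lt_trans hij hjn
  have hgi : PySem.List.pyGetD cs (i' : Int) ("", []) = cs.getD i' ("", []) :=
    PySem.List.pyGetD_natCast cs i' ("", [])
  have hgj : PySem.List.pyGetD cs (j' : Int) ("", []) = cs.getD j' ("", []) :=
    PySem.List.pyGetD_natCast cs j' ("", [])
  simp only [hgi, hgj]
  have hc := pv_counts_getD cs hnd hij hjn
  set m₁ := pvGenes cs i' with hm₁
  set m₂ := pvGenes cs j' with hm₂
  have hnd₁ : m₁.Nodup := pv_genes_nodup cs hnd hin
  have hnd₂ : m₂.Nodup := pv_genes_nodup cs hnd hjn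
  have hL : (PySem.Set.inter (cs.getD i' ("", [])).2 (cs.getD j' ("", [])).2)
      = m₁.filter (fun g => m₂.contains g) := by
    simp [PySem.Set.inter, PySem.Set.contains, hm₁, hm₂, pvGenes]
  have hlen1 : (m₁.filter (fun g => m₂.contains g)).length ≤ m₁.length :=
    List.length_filter_le _ _
  have hlen2 : (m₁.filter (fun g => m₂.contains g)).length ≤ m₂.length := by
    rw [pv_inter_comm hnd₁ hnd₂]
    exact List.length_filter_le _ _
  have hsub1 : PySem.Set.issubset (cs.getD i' ("", [])).2 (cs.getD j' ("", [])).2 = true ↔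
      (m₁.filter (fun g => m₂.contains g)).length = m₁.length := pv_subset_iff_len m₁ m₂
  have hsub2 : PySem.Set.issubset (cs.getD j' ("", [])).2 (cs.getD i' ("", [])).2 = true ↔
      (m₁.filter (fun g => m₂.contains g)).length = m₂.length := by
    rw [pv_inter_comm hnd₁ hnd₂]
    exact pv_subset_iff_len m₂ m₁
  have hcond : (!(PySem.Set.inter (cs.getD i' ("", [])).2 (cs.getD j' ("", [])).2).isEmpty &&
        !PySem.Set.issubset (cs.getD i' ("", [])).2 (cs.getD j' ("", [])).2 &&
        !PySem.Set.issubset (cs.getD j' ("", [])).2 (cs.getD i' ("", [])).2)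
      = (0 < (pvCounts cs).getD ((i' : Int), (j' : Int)) 0 &&
        (pvCounts cs).getD ((i' : Int), (j' : Int)) 0 < ((cs.getD i' ("", [])).2.length : Int) &&
        (pvCounts cs).getD ((i' : Int), (j' : Int)) 0 < ((cs.getD j' ("", [])).2.length : Int)) := by
    rw [Bool.eq_iff_iff]
    have hs1 : (PySem.Set.issubset (cs.getD i' ("", [])).2 (cs.getD j' ("", [])).2 = false)
        ↔ ¬ ((m₁.filter (fun g => m₂.contains g)).length = m₁.length) := by
      rw [Bool.eq_false_iff, Ne, hsub1]
    have hs2 : (PySem.Set.issubset (cs.getD j' ("", [])).2 (cs.getD i' ("", [])).2 = false)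
        ↔ ¬ ((m₁.filter (fun g => m₂.contains g)).length = m₂.length) := by
      rw [Bool.eq_false_iff, Ne, hsub2]
    have hlm₁ : (cs.getD i' ("", [])).2.length = m₁.length := rfl
    have hlm₂ : (cs.getD j' ("", [])).2.length = m₂.length := rfl
    simp only [Bool.and_eq_true, Bool.not_eq_true', hL, hc, decide_eq_true_eq, hs1, hs2,
      List.isEmpty_eq_false_iff, ← List.length_pos_iff, hlm₁, hlm₂]
    omega
  have hval : ((PySem.Set.inter (cs.getD i' ("", [])).2 (cs.getD j' ("", [])).2).length : Int)
      = (pvCounts cs).getD ((i' : Int), (j' : Int)) 0 := by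
    rw [hL, hc]
  simp only [hcond, hval]

-- ===== VERDICT (by name: the statement is the Claim_ definition above) =====
theorem find_overlaps_spec : Claim_equal_find_overlaps := by
  intro cs _ hnd
  unfold Spec_find_overlaps
  rw [pv_alt_eq]
  exact pv_main cs hnd
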